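-- pv_equiv track=rewrite | github.com/BY1994/Repository | Algorithm/Codeforces/2022_Codeforces_Global_Round_19_C.py | calc_op
-- ===== SOURCE A (Python) =====
-- def calc_op(n, a):
--     ans = 0
--     for i in range(1, n-1):
--         if a[i] % 2 == 0:
--             ans += a[i]//2
--         else:
--             ans += a[i]//2 + 1
--     return ans
-- ===== SOURCE B (Python) =====
-- def calc_op(n, a):
--     # divide and conquer over the index interval [1, n-1)
--     def go(lo, hi):
--         if hi - lo <= 0:
--             return 0
--         if hi - lo == 1:
--             return -(-a[lo] // 2)
--         mid = (lo + hi) // 2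
--         return go(lo, mid) + go(mid, hi)
--     return go(1, n - 1)
-- ===== Notes on version B (the rewrite author's own statement) =====
-- stated objective: alternative
-- what changed: Replaces A's linear left-to-right loop with a branch-free accumulator by a divide-and-conquer recursion that splits the index interval [1, n-1) at its midpoint and sums the two halves, computing each element's ceil(x/2) as -(-x//2) instead of A's parity branch.
import Mathlib
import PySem

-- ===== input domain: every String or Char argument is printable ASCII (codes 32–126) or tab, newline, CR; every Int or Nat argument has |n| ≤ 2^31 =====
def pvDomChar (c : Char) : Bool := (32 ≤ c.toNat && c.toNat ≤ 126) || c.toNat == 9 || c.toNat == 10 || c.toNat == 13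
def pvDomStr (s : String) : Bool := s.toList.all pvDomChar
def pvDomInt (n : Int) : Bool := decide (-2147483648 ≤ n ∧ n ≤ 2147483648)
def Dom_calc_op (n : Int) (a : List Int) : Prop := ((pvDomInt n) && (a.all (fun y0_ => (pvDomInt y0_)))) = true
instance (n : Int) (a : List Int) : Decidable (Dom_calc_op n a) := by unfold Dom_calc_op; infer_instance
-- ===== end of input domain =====

-- B replaces A's linear loop by a divide-and-conquer recursion splitting the index
-- interval [1, n-1) at its midpoint, computing each ceil(a[i]/2) as -(-a[i]//2).


-- ===== PORT A =====
-- a[i] with i ≥ 1 always: pyGet? is some on every admitted input (Pre_); getD 0 is never taken there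
def calc_op (n : Int) (a : List Int) : Int :=
  (PySem.List.pyRange 1 (n - 1) 1).foldl
    (fun ans i =>
      let x := (PySem.List.pyGet? a i).getD 0
      if PySem.Int.mod x 2 == 0 then ans + PySem.Int.floordiv x 2
      else ans + PySem.Int.floordiv x 2 + 1) 0

-- ===== PORT B =====
-- helper go(lo, hi): divide and conquer over the index interval
def calc_op_go (a : List Int) (lo hi : Int) : Int :=
  if hi - lo ≤ 0 then 0
  else if hi - lo = 1 then -(PySem.Int.floordiv (-((PySem.List.pyGet? a lo).getD 0)) 2)
  else
    let mid := PySem.Int.floordiv (lo + hi) 2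
    calc_op_go a lo mid + calc_op_go a mid hi
termination_by (hi - lo).toNat
decreasing_by
  all_goals
    have h2 := PySem.Int.floordiv_eq_ediv_of_pos (a := lo + hi) (b := 2) (by omega)
    rw [h2]
    omega

def calc_op_alt (n : Int) (a : List Int) : Int :=
  calc_op_go a 1 (n - 1)

-- ===== PRECONDITION & SPEC =====
-- Pre_ excludes exactly the inputs where Python A raises IndexError: n ≥ 3 with n > len(a)+1
def Pre_calc_op (n : Int) (a : List Int) : Prop := n ≤ (a.length : Int) + 1 ∨ n ≤ 2
instance (n : Int) (a : List Int) : Decidable (Pre_calc_op n a) := by unfold Pre_calc_op; infer_instance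
def pvWitness_calc_op : Int × List Int := (4, [7, 3, 2, 5])

def Spec_calc_op (n : Int) (a : List Int) (out : Int) : Prop := out = calc_op_alt n a
instance (n : Int) (a : List Int) (out : Int) : Decidable (Spec_calc_op n a out) := by unfold Spec_calc_op; infer_instance

-- ===== CLAIM =====
def Claim_equal_calc_op : Prop := ∀ (n : Int) (a : List Int), Dom_calc_op n a → Pre_calc_op n a → Spec_calc_op n a (calc_op n a)

-- ===== LEMMAS AND PROOFS =====

-- per element: ceil via negation equals A's parity branch
lemma ceil_branch (x : Int) :
    -(PySem.Int.floordiv (-x) 2) =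
      (if PySem.Int.mod x 2 == 0 then PySem.Int.floordiv x 2
       else PySem.Int.floordiv x 2 + 1) := by
  rw [PySem.Int.floordiv_eq_ediv_of_pos (by omega),
      PySem.Int.floordiv_eq_ediv_of_pos (by omega),
      PySem.Int.mod_eq_emod_of_pos (by omega)]
  by_cases hc : x % 2 = 0 <;> simp [hc] <;> omega

-- divide-and-conquer helper = sum of per-element ceilings over the range
lemma go_eq_sum (a : List Int) (lo hi : Int) :
    calc_op_go a lo hi =
      ((PySem.List.pyRange lo hi 1).map
        (fun i => -(PySem.Int.floordiv (-((PySem.List.pyGet? a i).getD 0)) 2))).sum := by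
  fun_induction calc_op_go a lo hi with
  | case1 lo hi h =>
    rw [PySem.List.pyRange_one_eq_nil (by omega)]; simp
  | case2 lo hi h h1 =>
    have : hi = lo + 1 := by omega
    subst this
    rw [PySem.List.pyRange_one_singleton]; simp
  | case3 lo hi h h1 mid ih1 ih2 =>
    have hmid := PySem.Int.floordiv_two_mid_bounds (lo := lo) (hi := hi) (by omega)
    rw [PySem.List.pyRange_one_append lo mid hi hmid.1 hmid.2,
        List.map_append, List.sum_append, ih1, ih2]

-- ===== VERDICT =====
theorem calc_op_spec : Claim_equal_calc_op := by
  intro n a _ _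
  unfold Spec_calc_op calc_op calc_op_alt
  have hstep :
      (fun (ans i : Int) =>
        let x := (PySem.List.pyGet? a i).getD 0
        if PySem.Int.mod x 2 == 0 then ans + PySem.Int.floordiv x 2
        else ans + PySem.Int.floordiv x 2 + 1)
      = (fun (ans i : Int) => ans +
          if PySem.Int.mod ((PySem.List.pyGet? a i).getD 0) 2 == 0
          then PySem.Int.floordiv ((PySem.List.pyGet? a i).getD 0) 2
          else PySem.Int.floordiv ((PySem.List.pyGet? a i).getD 0) 2 + 1) := by
    funext ans i
    simp only
    split <;> ring
  rw [go_eq_sum, hstep,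
      PySem.List.foldl_add
        (g := fun i =>
          if PySem.Int.mod ((PySem.List.pyGet? a i).getD 0) 2 == 0
          then PySem.Int.floordiv ((PySem.List.pyGet? a i).getD 0) 2
          else PySem.Int.floordiv ((PySem.List.pyGet? a i).getD 0) 2 + 1)]
  simp only [zero_add]
  congr 1
  apply List.map_congr_left
  intro i _
  simp only [ceil_branch]
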